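-- pv_equiv track=rewrite | github.com/HoagieClub/meal | backend/hoagiemeal/utils/dietary.py | set_intersects
-- ===== SOURCE A (Python) =====
-- from typing import List, Set, Dict
--
-- def set_intersects(tokens: Set[str], keywords: Set[str]) -> bool:
--     """Check if any token from a given set exists in a keyword set.
--
--     Args:
--         tokens: The tokens to check (e.g., from an ingredient).
--         keywords: The keyword set to check against.
--
--     Returns:
--         True if a match is found, false otherwise.
--     """
--     for token in tokens:
--         if token in keywords:
--             return True
--         # Also check for partials, e.g., 'chicken broth'
--         for keyword in keywords:
--             if keyword in token:
--                 return True
--     return False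
-- ===== SOURCE B (Python) =====
-- def set_intersects(tokens, keywords):
--     """Join all tokens into one haystack with a NUL sentinel (absent from the
--     printable-ASCII domain) so that each keyword needs a single substring
--     search over the combined text; an exact set hit is the keyword == token
--     case of the substring test, so no separate membership pass is needed."""
--     if not tokens:
--         return False
--     haystack = "\x00".join(tokens)
--     return any(kw in haystack for kw in keywords)
-- ===== Notes on version B (the rewrite author's own statement) =====
-- stated objective: alternative
-- what changed: B concatenates all tokens into one sentinel-separated haystack and runs a single substring search per keyword over it (exact membership being the keyword==token case), instead of A's per-token membership test plus nested per-token keyword scan.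
import Mathlib
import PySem

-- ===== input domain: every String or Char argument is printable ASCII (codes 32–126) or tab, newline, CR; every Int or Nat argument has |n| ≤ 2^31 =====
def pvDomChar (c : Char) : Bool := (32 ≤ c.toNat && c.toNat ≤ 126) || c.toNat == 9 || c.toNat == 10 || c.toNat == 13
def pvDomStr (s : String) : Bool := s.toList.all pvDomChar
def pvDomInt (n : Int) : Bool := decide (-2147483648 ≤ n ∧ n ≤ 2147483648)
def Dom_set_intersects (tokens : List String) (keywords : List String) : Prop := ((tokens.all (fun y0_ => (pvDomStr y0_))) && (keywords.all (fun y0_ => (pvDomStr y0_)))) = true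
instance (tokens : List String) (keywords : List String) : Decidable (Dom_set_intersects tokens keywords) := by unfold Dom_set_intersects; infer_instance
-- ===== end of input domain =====

-- B replaces A's per-token membership + nested keyword scan by one substring search per keyword over a single sentinel-joined haystack (objective: alternative).


-- ===== PORT A =====
-- A: for each token, first test exact set membership, then scan keywords for a substring hit.
def set_intersects (tokens : List String) (keywords : List String) : Bool :=
  tokens.any (fun token =>
    keywords.contains token ||
    keywords.any (fun keyword => PySem.Str.isIn keyword token))

-- ===== PORT B =====
-- B: sentinel-join all tokens into one haystack, then one substring search per keyword.
def set_intersects_alt (tokens : List String) (keywords : List String) : Bool :=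
  if tokens.isEmpty then false
  else
    let haystack := PySem.Str.join "\x00" tokens
    keywords.any (fun kw => PySem.Str.isIn kw haystack)

-- ===== PRECONDITION & SPEC =====
def Spec_set_intersects (tokens : List String) (keywords : List String) (out : Bool) : Prop := out = set_intersects_alt tokens keywords
instance (tokens : List String) (keywords : List String) (out : Bool) : Decidable (Spec_set_intersects tokens keywords out) := by unfold Spec_set_intersects; infer_instance

-- ===== CLAIM (what is proved, stated in full; the proofs are below) =====
def Claim_equal_set_intersects : Prop := ∀ (tokens : List String) (keywords : List String), Dom_set_intersects tokens keywords → Spec_set_intersects tokens keywords (set_intersects tokens keywords)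

-- ===== LEMMAS AND PROOFS =====

-- A prefix of a ++ c :: b avoiding c is a prefix of a.
theorem prefix_of_append_cons {kw a b : List Char} {c : Char} (hc : c ∉ kw)
    (h : kw <+: a ++ c :: b) : kw <+: a := by
  induction a generalizing kw with
  | nil =>
    match kw, h with
    | [], _ => exact List.nil_prefix
    | x :: kw', h =>
      exact absurd (List.cons_prefix_cons.mp h).1 (by rintro rfl; exact hc (List.mem_cons_self))
  | cons y a' ih =>
    match kw, h with
    | [], _ => exact List.nil_prefix
    | x :: kw', h =>
      obtain ⟨rfl, h'⟩ := List.cons_prefix_cons.mp h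
      exact List.cons_prefix_cons.mpr ⟨rfl, ih (fun hm => hc (List.mem_cons_of_mem _ hm)) h'⟩

-- An infix of a ++ c :: b avoiding c lies entirely in a or entirely in b.
theorem infix_of_append_cons {kw a b : List Char} {c : Char} (hc : c ∉ kw)
    (h : kw <:+: a ++ c :: b) : kw <:+: a ∨ kw <:+: b := by
  induction a generalizing kw with
  | nil =>
    rcases List.infix_cons_iff.mp h with hp | hi
    · exact Or.inl ((prefix_of_append_cons (a := []) hc hp).isInfix)
    · exact Or.inr hi
  | cons y a' ih =>
    rcases List.infix_cons_iff.mp h with hp | hi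
    · exact Or.inl (prefix_of_append_cons hc hp).isInfix
    · rcases ih hc hi with h1 | h2
      · exact Or.inl (h1.trans ((List.suffix_cons y a').isInfix))
      · exact Or.inr h2

-- Infix of a nonempty sentinel-join ↔ infix of one of the parts (sentinel not in the pattern).
theorem infix_join_iff {kw : List Char} {c : Char} (hc : c ∉ kw) :
    ∀ (ts : List (List Char)), ts ≠ [] →
    (kw <:+: PySem.Chars.join [c] ts ↔ ∃ t ∈ ts, kw <:+: t) := by
  intro ts
  induction ts with
  | nil => intro h; exact absurd rfl h
  | cons t rest ih =>
    intro _
    cases rest with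
    | nil => simp [PySem.Chars.join_singleton]
    | cons q rest' =>
      rw [PySem.Chars.join_cons_cons]
      constructor
      · intro h
        rw [List.append_assoc] at h
        rcases infix_of_append_cons hc h with h1 | h2
        · exact ⟨t, List.mem_cons_self, h1⟩
        · obtain ⟨u, hu, hkw⟩ := (ih (by simp)).mp h2
          exact ⟨u, List.mem_cons_of_mem _ hu, hkw⟩
      · rintro ⟨u, hu, hkw⟩
        rcases List.mem_cons.mp hu with rfl | hu'
        · rw [List.append_assoc]
          exact hkw.trans (List.prefix_append _ _).isInfix
        · exact (( (ih (by simp)).mpr ⟨u, hu', hkw⟩).trans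
            ((List.suffix_append _ _).isInfix))

theorem nul_not_mem_of_dom {kw : String} (h : pvDomStr kw = true) :
    '\x00' ∉ kw.toList := by
  intro hm
  have := (List.all_eq_true.mp h) _ hm
  simp [pvDomChar, Char.toNat] at this

-- ===== VERDICT (by name: the statement is the Claim_ definition above) =====
theorem set_intersects_spec : Claim_equal_set_intersects := by
  intro tokens keywords hdom
  unfold Spec_set_intersects set_intersects set_intersects_alt
  have hkdom : ∀ kw ∈ keywords, pvDomStr kw = true := by
    unfold Dom_set_intersects at hdom
    simp only [Bool.and_eq_true, List.all_eq_true] at hdom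
    exact hdom.2
  cases tokens with
  | nil => simp
  | cons t ts =>
    rw [if_neg (by simp), Bool.eq_iff_iff]
    simp only [List.any_eq_true, Bool.or_eq_true, List.contains_iff_mem]
    constructor
    · rintro ⟨tok, htok, hmem | ⟨kw, hkw, hin⟩⟩
      · refine ⟨tok, hmem, ?_⟩
        rw [PySem.Str.isIn_iff_infix, PySem.Str.toList_join]
        exact (infix_join_iff (nul_not_mem_of_dom (hkdom _ hmem)) _ (by simp)).mpr
          ⟨tok.toList, List.mem_map_of_mem htok, List.infix_rfl⟩
      · refine ⟨kw, hkw, ?_⟩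
        rw [PySem.Str.isIn_iff_infix, PySem.Str.toList_join]
        exact (infix_join_iff (nul_not_mem_of_dom (hkdom _ hkw)) _ (by simp)).mpr
          ⟨tok.toList, List.mem_map_of_mem htok, (PySem.Str.isIn_iff_infix _ _).mp hin⟩
    · rintro ⟨kw, hkw, hin⟩
      rw [PySem.Str.isIn_iff_infix, PySem.Str.toList_join] at hin
      obtain ⟨u, hu, hkwu⟩ :=
        (infix_join_iff (nul_not_mem_of_dom (hkdom _ hkw)) _ (by simp)).mp hin
      obtain ⟨tok, htok, rfl⟩ := List.mem_map.mp hu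
      exact ⟨tok, htok, Or.inr ⟨kw, hkw, (PySem.Str.isIn_iff_infix _ _).mpr hkwu⟩⟩
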